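-- pv_equiv track=rewrite | github.com/anu-bioinfo/pathway-connectivity | src/STRING_channels/run_channels.py | get_pathway_interactions
-- ===== SOURCE A (Python) =====
-- def get_pathway_interactions(interactions_in_reactome,pathway_nodes,all_pathway_nodes):
--
-- 	interactions_in_pathways = set()
-- 	interactions_in_same_pathway = set()
-- 	for n1,n2,val in interactions_in_reactome:
-- 		if n1 in all_pathway_nodes and n2 in all_pathway_nodes:
-- 			interactions_in_pathways.add((n1,n2))
-- 			for p in pathway_nodes:
-- 				if n1 in pathway_nodes[p] and n2 in pathway_nodes[p]:
-- 					interactions_in_same_pathway.add((n1,n2))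
-- 					break
-- 	return interactions_in_pathways,interactions_in_same_pathway
-- ===== SOURCE B (Python) =====
-- def get_pathway_interactions(interactions_in_reactome, pathway_nodes, all_pathway_nodes):
--     # Staged pipeline: (1) collect qualifying endpoint pairs, (2) invert pathway_nodes into
--     # a node->pathway-set index, (3) build both result sets from the pair list.
--     qualifying = [(n1, n2) for n1, n2, _ in interactions_in_reactome
--                   if n1 in all_pathway_nodes and n2 in all_pathway_nodes]
--     node_pathways = {}
--     for p, nodes in pathway_nodes.items():
--         for n in nodes:
--             node_pathways.setdefault(n, set()).add(p)
--     empty = set()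
--     interactions_in_pathways = set(qualifying)
--     interactions_in_same_pathway = {pr for pr in qualifying
--                                     if node_pathways.get(pr[0], empty) & node_pathways.get(pr[1], empty)}
--     return interactions_in_pathways, interactions_in_same_pathway
-- ===== Notes on version B (the rewrite author's own statement) =====
-- stated objective: alternative
-- what changed: B replaces A's one accumulator loop with per-edge pathway scans by a staged pipeline: it first filters the edge list into qualifying pairs, inverts pathway_nodes once into a node->pathway-set index, then builds the first set as set(qualifying) and the second by a comprehension testing pathway-set intersection of the two endpoints.
import Mathlib
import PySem

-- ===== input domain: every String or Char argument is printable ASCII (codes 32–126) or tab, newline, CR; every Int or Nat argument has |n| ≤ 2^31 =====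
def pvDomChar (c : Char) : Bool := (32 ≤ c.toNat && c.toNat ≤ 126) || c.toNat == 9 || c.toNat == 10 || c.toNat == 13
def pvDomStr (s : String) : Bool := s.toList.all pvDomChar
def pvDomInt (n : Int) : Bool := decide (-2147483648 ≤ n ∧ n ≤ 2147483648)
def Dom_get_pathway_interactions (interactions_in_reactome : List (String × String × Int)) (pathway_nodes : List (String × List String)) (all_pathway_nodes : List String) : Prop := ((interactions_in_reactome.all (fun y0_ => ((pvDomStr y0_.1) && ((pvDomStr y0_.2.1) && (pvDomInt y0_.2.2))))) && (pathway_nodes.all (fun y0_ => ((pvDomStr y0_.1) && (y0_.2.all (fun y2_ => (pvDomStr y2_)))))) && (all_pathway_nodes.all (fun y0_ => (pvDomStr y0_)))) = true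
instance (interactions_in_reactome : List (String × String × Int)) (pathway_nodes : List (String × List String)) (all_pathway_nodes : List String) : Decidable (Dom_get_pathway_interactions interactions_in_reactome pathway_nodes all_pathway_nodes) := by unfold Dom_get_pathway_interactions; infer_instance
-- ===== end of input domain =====

-- ===== PORT A =====
-- B restructures A into a staged pipeline (filter edges, invert pathway_nodes once, build both
-- sets from the pair list); alternative algorithm, not claimed faster.
def get_pathway_interactions (interactions_in_reactome : List (String × String × Int)) (pathway_nodes : List (String × List String)) (all_pathway_nodes : List String) : (List (String × String)) × (List (String × String)) :=
  let d := PySem.Dict.ofList pathway_nodes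
  interactions_in_reactome.foldl (fun st t =>
    if all_pathway_nodes.contains t.1 && all_pathway_nodes.contains t.2.1 then
      (PySem.Set.add st.1 (t.1, t.2.1),
       -- 'for p in pathway_nodes: if n1 in pathway_nodes[p] and n2 in pathway_nodes[p]: add; break'
       if d.keys.any (fun p => (d.getD p []).contains t.1 && (d.getD p []).contains t.2.1) then
         PySem.Set.add st.2 (t.1, t.2.1)
       else st.2)
    else st) ([], [])

-- ===== PORT B =====
-- node_pathways = {}; for p, nodes in pathway_nodes.items(): for n in nodes: node_pathways.setdefault(n, set()).add(p)
def pvInvert (items : List (String × List String)) : PySem.Dict String (PySem.Set String) :=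
  items.foldl (fun acc pr =>
    pr.2.foldl (fun acc n => acc.modify n [] (fun s => PySem.Set.add s pr.1)) acc) PySem.Dict.empty

def get_pathway_interactions_alt (interactions_in_reactome : List (String × String × Int)) (pathway_nodes : List (String × List String)) (all_pathway_nodes : List String) : (List (String × String)) × (List (String × String)) :=
  -- qualifying = [(n1, n2) for n1, n2, _ in interactions if n1 in all_pathway_nodes and n2 in all_pathway_nodes]
  let qualifying := (interactions_in_reactome.filter
      (fun t => all_pathway_nodes.contains t.1 && all_pathway_nodes.contains t.2.1)).map (fun t => (t.1, t.2.1))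
  let np := pvInvert (PySem.Dict.ofList pathway_nodes).items
  -- interactions_in_pathways = set(qualifying)
  -- interactions_in_same_pathway = {pr for pr in qualifying if np.get(pr[0], empty) & np.get(pr[1], empty)}
  (PySem.Set.ofList qualifying,
   PySem.Set.ofList (qualifying.filter
     (fun pr => !(PySem.Set.inter (np.getD pr.1 []) (np.getD pr.2 [])).isEmpty)))

-- ===== PRECONDITION & SPEC =====
def Spec_get_pathway_interactions (interactions_in_reactome : List (String × String × Int)) (pathway_nodes : List (String × List String)) (all_pathway_nodes : List String) (out : (List (String × String)) × (List (String × String))) : Prop := out = get_pathway_interactions_alt interactions_in_reactome pathway_nodes all_pathway_nodes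
instance (interactions_in_reactome : List (String × String × Int)) (pathway_nodes : List (String × List String)) (all_pathway_nodes : List String) (out : (List (String × String)) × (List (String × String))) : Decidable (Spec_get_pathway_interactions interactions_in_reactome pathway_nodes all_pathway_nodes out) := by unfold Spec_get_pathway_interactions; infer_instance

-- ===== CLAIM (what is proved, stated in full; the proofs are below) =====
def Claim_equal_get_pathway_interactions : Prop := ∀ (interactions_in_reactome : List (String × String × Int)) (pathway_nodes : List (String × List String)) (all_pathway_nodes : List String), Dom_get_pathway_interactions interactions_in_reactome pathway_nodes all_pathway_nodes → Spec_get_pathway_interactions interactions_in_reactome pathway_nodes all_pathway_nodes (get_pathway_interactions interactions_in_reactome pathway_nodes all_pathway_nodes)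

-- ===== LEMMAS AND PROOFS =====

-- A's single accumulator fold splits into two staged folds over the filtered, projected edge list.
theorem pv_fold_split {α β : Type} [BEq β] (I : List α) (g : α → Bool) (f : α → β) (c : β → Bool)
    (s1 s2 : PySem.Set β) :
    I.foldl (fun st t =>
      if g t then
        (PySem.Set.add st.1 (f t), if c (f t) then PySem.Set.add st.2 (f t) else st.2)
      else st) (s1, s2)
    = (((I.filter g).map f).foldl PySem.Set.add s1,
       (((I.filter g).map f).filter c).foldl PySem.Set.add s2) := by
  induction I generalizing s1 s2 with
  | nil => rfl
  | cons t I ih =>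
      by_cases hg : g t = true
      · by_cases hc : c (f t) = true
        · simp [hg, hc, ih]
        · simp [hg, hc, ih]
      · simp [hg, ih]

-- membership in the inner foldl of pvInvert
theorem pv_mem_inner (p : String) (ns : List String) (acc : PySem.Dict String (PySem.Set String)) (m x : String) :
    x ∈ (ns.foldl (fun acc n => acc.modify n [] (fun s => PySem.Set.add s p)) acc).getD m [] ↔
      x ∈ acc.getD m [] ∨ (x = p ∧ m ∈ ns) := by
  induction ns generalizing acc with
  | nil => simp
  | cons n ns ih =>
      simp only [List.foldl_cons, ih, PySem.Dict.getD_modify]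
      by_cases h : m = n
      · subst h
        simp [PySem.Set.mem_add]
        try tauto
      · simp [h]
        try tauto

-- membership in pvInvert's fold over any prefix, from any accumulator
theorem pv_mem_invert_fold (L : List (String × List String)) (acc : PySem.Dict String (PySem.Set String)) (m x : String) :
    x ∈ (L.foldl (fun acc pr => pr.2.foldl (fun acc n => acc.modify n [] (fun s => PySem.Set.add s pr.1)) acc) acc).getD m [] ↔
      x ∈ acc.getD m [] ∨ ∃ pr ∈ L, x = pr.1 ∧ m ∈ pr.2 := by
  induction L generalizing acc with
  | nil => simp
  | cons pr L ih =>
      simp only [List.foldl_cons, ih, pv_mem_inner, List.mem_cons]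
      constructor
      · rintro (h | h)
        · rcases h with h | h
          · exact Or.inl h
          · exact Or.inr ⟨pr, Or.inl rfl, h⟩
        · obtain ⟨q, hq, hx⟩ := h
          exact Or.inr ⟨q, Or.inr hq, hx⟩
      · rintro (h | h)
        · exact Or.inl (Or.inl h)
        · obtain ⟨q, hq, hx⟩ := h
          rcases hq with rfl | hq
          · exact Or.inl (Or.inr hx)
          · exact Or.inr ⟨q, hq, hx⟩

theorem pv_mem_invert (L : List (String × List String)) (m x : String) :
    x ∈ (pvInvert L).getD m [] ↔ ∃ pr ∈ L, x = pr.1 ∧ m ∈ pr.2 := by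
  unfold pvInvert
  rw [pv_mem_invert_fold]
  simp [PySem.Dict.getD_empty]

-- A's per-edge pathway scan and B's intersection-nonemptiness test agree
theorem pv_cond_eq (P : List (String × List String)) (a b : String) :
    (PySem.Dict.ofList P).keys.any
        (fun p => ((PySem.Dict.ofList P).getD p []).contains a && ((PySem.Dict.ofList P).getD p []).contains b)
      = !(PySem.Set.inter ((pvInvert (PySem.Dict.ofList P).items).getD a [])
            ((pvInvert (PySem.Dict.ofList P).items).getD b [])).isEmpty := by
  set d := PySem.Dict.ofList P with hd
  have hnd : d.keys.Nodup := PySem.Dict.nodup_keys_ofList P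
  rw [Bool.eq_iff_iff]
  have hA : (d.keys.any
      (fun p => (d.getD p []).contains a && (d.getD p []).contains b)) = true ↔
      ∃ pr ∈ d.items, a ∈ pr.2 ∧ b ∈ pr.2 := by
    rw [List.any_eq_true]
    constructor
    · rintro ⟨p, hp, hc⟩
      simp only [Bool.and_eq_true, List.contains_iff_mem] at hc
      obtain ⟨v, hv⟩ : ∃ v, d.get? p = some v := by
        rcases Option.eq_none_or_eq_some (d.get? p) with h | h
        · exact absurd ((PySem.Dict.get?_eq_none_iff_not_mem_keys d p).mp h) (by simp [hp])
        · exact h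
      have hitem : (p, v) ∈ d.items := PySem.Dict.mem_items_of_get?_eq_some d hv
      have hg : d.getD p [] = v := PySem.Dict.getD_of_mem_items d hitem hnd []
      rw [hg] at hc
      exact ⟨(p, v), hitem, hc.1, hc.2⟩
    · rintro ⟨pr1, hpr, ha, hb⟩
      refine ⟨pr1.1, PySem.Dict.mem_keys_of_mem_items d hpr, ?_⟩
      have hg : d.getD pr1.1 [] = pr1.2 := PySem.Dict.getD_of_mem_items d hpr hnd []
      simp [hg, ha, hb]
  have hB : (!(PySem.Set.inter ((pvInvert d.items).getD a [])
      ((pvInvert d.items).getD b [])).isEmpty) = true ↔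
      ∃ x, x ∈ (pvInvert d.items).getD a [] ∧ x ∈ (pvInvert d.items).getD b [] := by
    rw [Bool.not_eq_true', List.isEmpty_eq_false_iff_exists_mem]
    simp [PySem.Set.mem_inter]
  rw [hA, hB]
  constructor
  · rintro ⟨pr1, hpr, ha, hb⟩
    exact ⟨pr1.1, (pv_mem_invert _ _ _).mpr ⟨pr1, hpr, rfl, ha⟩,
           (pv_mem_invert _ _ _).mpr ⟨pr1, hpr, rfl, hb⟩⟩
  · rintro ⟨x, hxa, hxb⟩
    obtain ⟨pr1, hpr, hx1, ha⟩ := (pv_mem_invert _ _ _).mp hxa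
    obtain ⟨pr2, hqr, hx2, hb⟩ := (pv_mem_invert _ _ _).mp hxb
    have hk : pr2.1 = pr1.1 := by rw [← hx1, ← hx2]
    have h1 : d.get? pr1.1 = some pr1.2 := PySem.Dict.get?_of_mem_items d hpr hnd
    have h2 : d.get? pr2.1 = some pr2.2 := PySem.Dict.get?_of_mem_items d hqr hnd
    rw [hk, h1] at h2
    have hv : pr1.2 = pr2.2 := Option.some.inj h2
    exact ⟨pr1, hpr, ha, by rw [hv]; exact hb⟩

-- ===== VERDICT (by name: the statement is the Claim_ definition above) =====
theorem get_pathway_interactions_spec : Claim_equal_get_pathway_interactions := by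
  intro I P AN _
  unfold Spec_get_pathway_interactions get_pathway_interactions get_pathway_interactions_alt
  simp only []
  rw [pv_fold_split I
      (fun t => AN.contains t.1 && AN.contains t.2.1)
      (fun t => (t.1, t.2.1))
      (fun pr => (PySem.Dict.ofList P).keys.any
        (fun p => ((PySem.Dict.ofList P).getD p []).contains pr.1 && ((PySem.Dict.ofList P).getD p []).contains pr.2))]
  rw [PySem.Set.ofList_eq_foldl, PySem.Set.ofList_eq_foldl]
  congr 2
  exact List.filter_congr fun pr _ => pv_cond_eq P pr.1 pr.2
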